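-- pv_equiv track=rewrite | github.com/artemlight/dgs1210_fun | export-vlans.py | iter_bit
-- ===== SOURCE A (Python) =====
-- def iter_bit(number):
--     bit = 1
--     idx = 7
--     while number >= bit:
--         if number & bit:
--             yield idx
--         idx -= 1
--         bit <<= 1
-- ===== SOURCE B (Python) =====
-- def iter_bit(number):
--     # Alternative: jump directly to each set bit (lowest first) instead of scanning every bit position.
--     while number > 0:
--         lowbit = number & -number
--         yield 7 - (lowbit.bit_length() - 1)
--         number ^= lowbit
-- ===== Notes on version B (the rewrite author's own statement) =====
-- stated objective: alternative
-- what changed: B extracts the lowest set bit with number & -number and clears it with xor, iterating once per set bit, instead of A's per-position scan that tests every bit up to the highest one.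
import Mathlib
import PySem

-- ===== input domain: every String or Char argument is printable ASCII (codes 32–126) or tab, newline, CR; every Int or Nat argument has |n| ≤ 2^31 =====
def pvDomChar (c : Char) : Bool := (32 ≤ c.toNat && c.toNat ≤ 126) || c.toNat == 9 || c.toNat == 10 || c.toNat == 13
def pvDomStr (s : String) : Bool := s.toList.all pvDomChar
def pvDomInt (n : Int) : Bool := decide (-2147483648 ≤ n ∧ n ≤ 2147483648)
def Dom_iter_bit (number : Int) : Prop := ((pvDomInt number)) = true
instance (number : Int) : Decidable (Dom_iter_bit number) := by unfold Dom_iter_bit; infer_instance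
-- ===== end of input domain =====

-- B replaces A's scan over every bit position by extracting the lowest set bit
-- (number & -number) once per set bit; same return values, different traversal.


-- ===== PORT A =====
-- A's loop: bit starts at 1 and doubles; it is represented as 2^k with k the
-- number of doublings (bit <<= 1 becomes k+1).  Python's `number & bit`
-- truthiness is `Int.land number (2^k) ≠ 0` (both exact: & on ints is Int.land).
def iterBitLoopA (number : Int) (k : Nat) (idx : Int) : List Int :=
  if (2 : Int) ^ k ≤ number then
    (if Int.land number ((2 : Int) ^ k) ≠ 0 then [idx] else []) ++ iterBitLoopA number (k + 1) (idx - 1)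
  else []
termination_by number.toNat - k
decreasing_by
  refine Nat.sub_succ_lt_self _ _ ?_
  refine Nat.lt_of_lt_of_le Nat.lt_two_pow_self ?_
  rw [← Int.toNat_natCast (2 ^ k)]
  exact Int.toNat_le_toNat (by exact_mod_cast ‹(2 : Int) ^ k ≤ number›)

def iter_bit (number : Int) : List Int := iterBitLoopA number 0 7

-- ===== PORT B =====
-- the port of B: extract the lowest set bit (number & -number), emit
-- 7 - (bit_length - 1) where bit_length of the positive lowbit is log2 + 1,
-- then clear it with xor (^ on ints is Int.xor, & is Int.land: both exact).
-- fuel = number.toNat + 1 is a pure totality guard: number.toNat strictly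
-- decreases at every step, so the fuel never runs out (proved in loopB_eq).
def iterBitLoopB (fuel : Nat) (number : Int) : List Int :=
  match fuel with
  | 0 => []
  | f + 1 =>
    if 0 < number then
      let lowbit := Int.land number (-number)
      (7 - (((lowbit.toNat.log2 + 1 : Nat) : Int) - 1)) :: iterBitLoopB f (Int.xor number lowbit)
    else []

def iter_bit_alt (number : Int) : List Int := iterBitLoopB (number.toNat + 1) number

-- ===== PRECONDITION & SPEC =====
def Spec_iter_bit (number : Int) (out : List Int) : Prop := out = iter_bit_alt number
instance (number : Int) (out : List Int) : Decidable (Spec_iter_bit number out) := by unfold Spec_iter_bit; infer_instance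

-- ===== CLAIM (what is proved, stated in full; the proofs are below) =====
def Claim_equal_iter_bit : Prop := ∀ (number : Int), Dom_iter_bit number → Spec_iter_bit number (iter_bit number)

-- ===== LEMMAS AND PROOFS =====

def pvTz (n : Nat) : Nat :=
  if h : n = 0 then 0
  else if n % 2 = 1 then 0 else pvTz (n / 2) + 1
termination_by n
decreasing_by exact Nat.div_lt_self (Nat.pos_of_ne_zero h) (by omega)

theorem pvTz_spec (n : Nat) (h : 0 < n) : ∃ q, n = 2 ^ pvTz n * q ∧ q % 2 = 1 := by
  induction n using Nat.strong_induction_on with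
  | _ n ih =>
    rw [pvTz]
    have hne : ¬ n = 0 := by omega
    simp only [hne, dite_false]
    by_cases ho : n % 2 = 1
    · simp only [ho, if_true]
      exact ⟨n, by simp, ho⟩
    · simp only [ho, if_false]
      have hpos : 0 < n / 2 := by omega
      obtain ⟨q, hq, hodd⟩ := ih (n / 2) (Nat.div_lt_self h (by omega)) hpos
      refine ⟨q, ?_, hodd⟩
      have h2 : (2 : Nat) ^ (pvTz (n / 2) + 1) * q = 2 * (2 ^ pvTz (n / 2) * q) := by
        rw [pow_succ]; ring
      rw [h2, ← hq]; omega

-- (a*b - 1) / a = b - 1 for positive a, b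
theorem pvDivPred (a b : Nat) (ha : 0 < a) (hb : 0 < b) : (a * b - 1) / a = b - 1 := by
  have hp : a * (b - 1) = a * b - a := Nat.mul_pred a b
  have hle : a ≤ a * b := Nat.le_mul_of_pos_right a hb
  have h1 : a * b - 1 = a * (b - 1) + (a - 1) := by omega
  rw [h1, Nat.mul_add_div ha, Nat.div_eq_of_lt (by omega)]
  omega

-- for odd q and j ≥ 1, (q - 1) / 2^j = q / 2^j
theorem pvPredDiv (q j : Nat) (hq : q % 2 = 1) (hj : 1 ≤ j) : (q - 1) / 2 ^ j = q / 2 ^ j := by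
  have hd : (0 : Nat) < 2 ^ j := Nat.two_pow_pos j
  have hdvd : (2 : Nat) ∣ 2 ^ j := dvd_pow_self 2 (by omega)
  have hm : q % 2 ^ j % 2 = 1 := by rw [Nat.mod_mod_of_dvd q hdvd]; exact hq
  obtain ⟨d, r, hdr, hrlt, hro⟩ :
      ∃ d r, 2 ^ j * d + r = q ∧ r < 2 ^ j ∧ r % 2 = 1 :=
    ⟨q / 2 ^ j, q % 2 ^ j, Nat.div_add_mod q (2 ^ j), Nat.mod_lt q hd, hm⟩
  have e1 : q / 2 ^ j = d := by
    rw [← hdr, Nat.mul_add_div hd, Nat.div_eq_of_lt hrlt]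
    omega
  have e2 : (q - 1) / 2 ^ j = d := by
    rw [show q - 1 = 2 ^ j * d + (r - 1) by omega, Nat.mul_add_div hd,
      Nat.div_eq_of_lt (by omega)]
    omega
  omega

theorem pvTestBit (n i : Nat) : n.testBit i = decide (n / 2 ^ i % 2 = 1) :=
  Nat.testBit_eq_decide_div_mod_eq

-- bits of n, n-1 and n - 2^t where t = pvTz n
theorem pvBits (n : Nat) (h : 0 < n) :
    (∀ i, i < pvTz n → n.testBit i = false ∧ (n - 1).testBit i = true) ∧
    (n.testBit (pvTz n) = true ∧ (n - 1).testBit (pvTz n) = false) ∧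
    (∀ i, pvTz n < i → (n - 1).testBit i = n.testBit i ∧ (n - 2 ^ pvTz n).testBit i = n.testBit i) ∧
    (∀ i, i ≤ pvTz n → (n - 2 ^ pvTz n).testBit i = false) := by
  obtain ⟨q, hn, hq⟩ := pvTz_spec n h
  set t := pvTz n with ht
  have hqpos : 0 < q := by
    rcases Nat.eq_zero_or_pos q with h0 | h0
    · subst h0; simp at hn; omega
    · exact h0
  have hsub : n - 2 ^ t = 2 ^ t * (q - 1) := by
    have hmp := Nat.mul_pred (2 ^ t) q
    rw [Nat.pred_eq_sub_one] at hmp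
    omega
  refine ⟨?_, ⟨?_, ?_⟩, ?_, ?_⟩
  · intro i hi
    have hpow : (2 : Nat) ^ t = 2 ^ i * 2 ^ (t - i) := by rw [← pow_add]; congr 1; omega
    have hnd : n / 2 ^ i = 2 ^ (t - i) * q := by
      rw [hn, hpow, Nat.mul_assoc, Nat.mul_div_cancel_left _ (Nat.two_pow_pos i)]
    have hev : 2 ^ (t - i) * q = 2 * (2 ^ (t - i - 1) * q) := by
      conv_lhs => rw [show t - i = (t - i - 1) + 1 by omega]
      rw [pow_succ]; ring
    have hnd1 : (n - 1) / 2 ^ i = 2 ^ (t - i) * q - 1 := by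
      rw [hn, hpow, Nat.mul_assoc]
      exact pvDivPred _ _ (Nat.two_pow_pos i) (by positivity)
    constructor
    · rw [pvTestBit, hnd, hev]
      simp only [decide_eq_false_iff_not]; omega
    · rw [pvTestBit, hnd1, hev]
      have hx : 0 < 2 * (2 ^ (t - i - 1) * q) := by positivity
      simp only [decide_eq_true_eq]; omega
  · rw [pvTestBit, hn, Nat.mul_div_cancel_left _ (Nat.two_pow_pos t)]
    simp [hq]
  · rw [pvTestBit, hn, pvDivPred _ _ (Nat.two_pow_pos t) hqpos]
    simp only [decide_eq_false_iff_not]; omega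
  · intro i hi
    have hji : i = t + (i - t) := by omega
    have hjp : 1 ≤ i - t := by omega
    have hnd : n / 2 ^ i = q / 2 ^ (i - t) := by
      rw [hn, hji, pow_add, ← Nat.div_div_eq_div_mul,
        Nat.mul_div_cancel_left _ (Nat.two_pow_pos t), Nat.add_sub_cancel_left]
    have hnd1 : (n - 1) / 2 ^ i = (q - 1) / 2 ^ (i - t) := by
      rw [hn, hji, pow_add, ← Nat.div_div_eq_div_mul,
        pvDivPred _ _ (Nat.two_pow_pos t) hqpos, Nat.add_sub_cancel_left]
    have hnd2 : (n - 2 ^ t) / 2 ^ i = (q - 1) / 2 ^ (i - t) := by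
      rw [hsub, hji, pow_add, ← Nat.div_div_eq_div_mul,
        Nat.mul_div_cancel_left _ (Nat.two_pow_pos t), Nat.add_sub_cancel_left]
    have hpd := pvPredDiv q (i - t) hq hjp
    constructor
    · rw [pvTestBit, pvTestBit, hnd, hnd1, hpd]
    · rw [pvTestBit, pvTestBit, hnd, hnd2, hpd]
  · intro i hi
    have hpow : (2 : Nat) ^ t = 2 ^ i * 2 ^ (t - i) := by rw [← pow_add]; congr 1; omega
    have hnd : (n - 2 ^ t) / 2 ^ i = 2 ^ (t - i) * (q - 1) := by
      rw [hsub, hpow, Nat.mul_assoc, Nat.mul_div_cancel_left _ (Nat.two_pow_pos i)]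
    have hev : 2 ^ (t - i) * (q - 1) % 2 = 0 := by
      rcases Nat.lt_or_ge i t with hc | hc
      · have : 2 ^ (t - i) * (q - 1) = 2 * (2 ^ (t - i - 1) * (q - 1)) := by
          conv_lhs => rw [show t - i = (t - i - 1) + 1 by omega]
          rw [pow_succ]; ring
        omega
      · have h0 : t - i = 0 := by omega
        rw [h0, pow_zero, one_mul]; omega
    rw [pvTestBit, hnd]
    simp only [decide_eq_false_iff_not]; omega

theorem pvLowbitLe (n : Nat) (h : 0 < n) : 2 ^ pvTz n ≤ n := by
  obtain ⟨q, hn, hq⟩ := pvTz_spec n h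
  have hqpos : 0 < q := by
    rcases Nat.eq_zero_or_pos q with h0 | h0
    · subst h0; simp at hn; omega
    · exact h0
  calc 2 ^ pvTz n = 2 ^ pvTz n * 1 := by ring
    _ ≤ 2 ^ pvTz n * q := Nat.mul_le_mul_left _ hqpos
    _ = n := hn.symm

theorem pvLdiff (n : Nat) (h : 0 < n) : n.ldiff (n - 1) = 2 ^ pvTz n := by
  obtain ⟨hlt, ⟨heq1, heq2⟩, hgt, _⟩ := pvBits n h
  apply Nat.eq_of_testBit_eq
  intro i
  rw [Nat.testBit_ldiff, Nat.testBit_two_pow]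
  rcases Nat.lt_trichotomy i (pvTz n) with hc | hc | hc
  · obtain ⟨h1, h2⟩ := hlt i hc; simp [h1, h2]; omega
  · subst hc; simp [heq1, heq2]
  · obtain ⟨h1, _⟩ := hgt i hc; rw [h1]; simp; omega

theorem pvXorLow (n : Nat) (h : 0 < n) : n ^^^ 2 ^ pvTz n = n - 2 ^ pvTz n := by
  obtain ⟨hlt, ⟨heq1, _⟩, hgt, hle⟩ := pvBits n h
  apply Nat.eq_of_testBit_eq
  intro i
  rw [Nat.testBit_xor, Nat.testBit_two_pow]
  rcases Nat.lt_trichotomy i (pvTz n) with hc | hc | hc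
  · obtain ⟨h1, _⟩ := hlt i hc
    rw [h1, hle i (by omega)]; simp; omega
  · subst hc; rw [heq1, hle (pvTz n) (le_refl _)]; simp
  · obtain ⟨_, h2⟩ := hgt i hc
    have hne : pvTz n ≠ i := by omega
    rw [h2]; simp [hne]

theorem pvIntLandNeg (n : Nat) (h : 0 < n) :
    Int.land (n : Int) (-(n : Int)) = ((2 ^ pvTz n : Nat) : Int) := by
  obtain ⟨m, rfl⟩ : ∃ m, n = m + 1 := ⟨n - 1, by omega⟩
  have hneg : (-((m + 1 : Nat) : Int)) = Int.negSucc m := rfl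
  rw [hneg]
  show ((Nat.ldiff (m + 1) m : Nat) : Int) = _
  have h2 := pvLdiff (m + 1) (by omega)
  simp only [Nat.add_sub_cancel] at h2
  rw [h2]

theorem pvIntXor (a b : Nat) : Int.xor (a : Int) (b : Int) = ((a ^^^ b : Nat) : Int) := rfl


-- reference: indices idx, idx-1, … for the set bits of n, lowest bit first
def bitsAsc (n : Nat) (idx : Int) : List Int :=
  if h : n = 0 then []
  else (if n % 2 = 1 then [idx] else []) ++ bitsAsc (n / 2) (idx - 1)
termination_by n
decreasing_by exact Nat.div_lt_self (Nat.pos_of_ne_zero h) (by omega)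

theorem bitsAsc_zero (idx : Int) : bitsAsc 0 idx = [] := by rw [bitsAsc]; simp

theorem bitsAsc_even (m : Nat) (idx : Int) (he : m % 2 = 0) :
    bitsAsc m idx = bitsAsc (m / 2) (idx - 1) := by
  rcases Nat.eq_zero_or_pos m with h0 | h0
  · subst h0; simp [bitsAsc_zero]
  · rw [bitsAsc]
    simp [show ¬ m = 0 by omega, he]

theorem bitsAsc_odd (m : Nat) (idx : Int) (ho : m % 2 = 1) :
    bitsAsc m idx = idx :: bitsAsc (m / 2) (idx - 1) := by
  rw [bitsAsc]
  simp [show ¬ m = 0 by omega, ho]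

-- A's loop computes bitsAsc of the shifted number
theorem loopA_eq (number : Int) (k : Nat) (idx : Int) :
    iterBitLoopA number k idx = bitsAsc (number.toNat / 2 ^ k) idx := by
  refine iterBitLoopA.induct number
    (fun k idx => iterBitLoopA number k idx = bitsAsc (number.toNat / 2 ^ k) idx) ?_ ?_ k idx
  · intro k idx h ih
    rw [iterBitLoopA]
    rw [if_pos h]
    have h1 : ((2 ^ k : Nat) : Int) ≤ number := by push_cast; exact h
    have h2 : (2 ^ k : Nat) ≤ number.toNat := by omega
    have hge : (0 : Int) ≤ number := le_trans (by positivity) h1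
    have hnum : number = ((number.toNat : Nat) : Int) := (Int.toNat_of_nonneg hge).symm
    set n := number.toNat with hn
    have hpos : 0 < n / 2 ^ k := (Nat.one_le_div_iff (Nat.two_pow_pos k)).mpr h2
    have hpk : (2 : Int) ^ k = ((2 ^ k : Nat) : Int) := by push_cast; ring
    have hland : Int.land number ((2 : Int) ^ k) = ((n &&& 2 ^ k : Nat) : Int) := by
      rw [hnum, hpk]; rfl
    have hand : n &&& 2 ^ k = (if n / 2 ^ k % 2 = 1 then 2 ^ k else 0) := by
      rw [Nat.and_two_pow, pvTestBit]
      by_cases hd : n / 2 ^ k % 2 = 1 <;> simp [hd]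
    have hdiv : n / 2 ^ k / 2 = n / 2 ^ (k + 1) := by
      rw [Nat.div_div_eq_div_mul, pow_succ]
    by_cases hb : n / 2 ^ k % 2 = 1
    · rw [if_pos (by rw [hland, hand, if_pos hb]; exact_mod_cast (Nat.two_pow_pos k).ne')]
      rw [ih, bitsAsc_odd _ idx hb, hdiv]; rfl
    · have hb0 : n / 2 ^ k % 2 = 0 := by omega
      rw [if_neg (by rw [hland, hand, if_neg hb]; simp)]
      rw [ih, bitsAsc_even _ idx hb0, hdiv]; rfl
  · intro k idx h
    rw [iterBitLoopA]
    rw [if_neg h]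
    have hz : number.toNat / 2 ^ k = 0 := by
      apply Nat.div_eq_of_lt
      have h1 : number < (2 : Int) ^ k := by omega
      have h2 : ((2 ^ k : Nat) : Int) = (2 : Int) ^ k := by push_cast; ring
      have h3 : (0 : Nat) < 2 ^ k := Nat.two_pow_pos k
      omega
    rw [hz, bitsAsc_zero]

-- removing the lowest set bit removes the first emitted index
theorem bitsAsc_shift (n : Nat) (h : 0 < n) (idx : Int) :
    bitsAsc n idx = (idx - pvTz n) :: bitsAsc (n - 2 ^ pvTz n) idx := by
  induction n using Nat.strong_induction_on generalizing idx with
  | _ n ih =>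
    by_cases ho : n % 2 = 1
    · have ht : pvTz n = 0 := by rw [pvTz]; simp [show ¬ n = 0 by omega, ho]
      rw [ht, bitsAsc_odd n idx ho]
      simp only [pow_zero, Nat.cast_zero, sub_zero]
      congr 1
      rw [bitsAsc_even (n - 1) idx (by omega)]
      congr 1
      omega
    · have hne : ¬ n = 0 := by omega
      have ht : pvTz n = pvTz (n / 2) + 1 := by rw [pvTz]; simp [hne, ho]
      have hpos2 : 0 < n / 2 := by omega
      have hle2 : 2 ^ pvTz (n / 2) ≤ n / 2 := pvLowbitLe _ hpos2
      have hp1 : (2 : Nat) ^ (pvTz (n / 2) + 1) = 2 * 2 ^ pvTz (n / 2) := by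
        rw [pow_succ]; ring
      rw [bitsAsc_even n idx (by omega), ih (n / 2) (Nat.div_lt_self h (by omega)) hpos2 (idx - 1), ht]
      have hhead : idx - 1 - (pvTz (n / 2) : Int) = idx - ((pvTz (n / 2) + 1 : Nat) : Int) := by
        push_cast; ring
      rw [hhead]
      congr 1
      rw [bitsAsc_even (n - 2 ^ (pvTz (n / 2) + 1)) idx (by omega)]
      congr 1
      have hhalf : n - 2 ^ (pvTz (n / 2) + 1) = 2 * (n / 2 - 2 ^ pvTz (n / 2)) := by omega
      rw [hhalf, Nat.mul_div_cancel_left _ (show 0 < 2 by omega)]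

-- B's loop computes bitsAsc with start index 7 (given enough fuel)
theorem loopB_eq (fuel n : Nat) (hf : n < fuel) : iterBitLoopB fuel (n : Int) = bitsAsc n 7 := by
  induction fuel generalizing n with
  | zero => omega
  | succ f ih =>
    rcases Nat.eq_zero_or_pos n with h0 | h0
    · subst h0
      rw [iterBitLoopB, bitsAsc_zero]
      norm_num
    · rw [iterBitLoopB]
      have hp : (0 : Int) < (n : Int) := by exact_mod_cast h0
      simp only [if_pos hp, pvIntLandNeg n h0, pvIntXor, pvXorLow n h0]
      have h2 : (0 : Nat) < 2 ^ pvTz n := Nat.two_pow_pos _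
      rw [ih (n - 2 ^ pvTz n) (by omega), bitsAsc_shift n h0 7]
      congr 1
      have hlog : (((2 ^ pvTz n : Nat) : Int)).toNat.log2 = pvTz n := by
        rw [Int.toNat_natCast, Nat.log2_two_pow]
      rw [hlog]
      push_cast; ring

-- ===== VERDICT (by name: the statement is the Claim_ definition above) =====
theorem iter_bit_spec : Claim_equal_iter_bit := by
  intro number _
  unfold Spec_iter_bit iter_bit iter_bit_alt
  rw [loopA_eq number 0 7]
  simp only [pow_zero, Nat.div_one]
  by_cases h : 0 ≤ number
  · have hnum : number = ((number.toNat : Nat) : Int) := (Int.toNat_of_nonneg h).symm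
    conv_rhs => rw [hnum]
    rw [Int.toNat_natCast]
    exact (loopB_eq (number.toNat + 1) number.toNat (by omega)).symm
  · have h1 : number.toNat = 0 := by omega
    rw [h1]
    rw [iterBitLoopB]
    have h2 : ¬ (0 : Int) < number := by omega
    simp [h2, bitsAsc_zero]
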